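-- pv_equiv track=rewrite | github.com/Commod0re/qualia_sonos_controller | src/babyxml.py | _tokenator
-- ===== SOURCE A (Python) =====
-- def _tokenator(xml):
--     collected = []
--     for ch in xml:
--         if ch == '<':
--             if collected:
--                 yield ''.join(collected)
--                 collected.clear()
--         elif ch in {'\r', '\n'}:
--             continue
--         elif ch == '>':
--             collected.append(ch)
--             yield ''.join(collected)
--             collected.clear()
--             continue
--
--         collected.append(ch)
-- ===== SOURCE B (Python) =====
-- def _tokenator(xml):
--     # split-based tokenizer: strip CR/LF, split on '>' (kept) then on '<' (kept); trailing buffer dropped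
--     s = xml.replace('\r', '').replace('\n', '')
--     chunks = s.split('>')
--     for c in chunks[:-1]:
--         pieces = c.split('<')
--         if len(pieces) == 1:
--             yield pieces[0] + '>'
--         else:
--             if pieces[0]:
--                 yield pieces[0]
--             for p in pieces[1:-1]:
--                 yield '<' + p
--             yield '<' + pieces[-1] + '>'
--     pieces = chunks[-1].split('<')
--     if len(pieces) > 1 and pieces[0]:
--         yield pieces[0]
--     for p in pieces[1:-1]:
--         yield '<' + p
-- ===== Notes on version B (the rewrite author's own statement) =====
-- stated objective: idiomatic
-- what changed: A is a char-by-char state machine with a mutable buffer; B strips CR/LF up front with str.replace and then splits the string on '>' and '<' delimiters, assembling each token from the split pieces (keeping '>' at the end of its token and '<' at the start, and dropping the trailing unterminated piece).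
import Mathlib
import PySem

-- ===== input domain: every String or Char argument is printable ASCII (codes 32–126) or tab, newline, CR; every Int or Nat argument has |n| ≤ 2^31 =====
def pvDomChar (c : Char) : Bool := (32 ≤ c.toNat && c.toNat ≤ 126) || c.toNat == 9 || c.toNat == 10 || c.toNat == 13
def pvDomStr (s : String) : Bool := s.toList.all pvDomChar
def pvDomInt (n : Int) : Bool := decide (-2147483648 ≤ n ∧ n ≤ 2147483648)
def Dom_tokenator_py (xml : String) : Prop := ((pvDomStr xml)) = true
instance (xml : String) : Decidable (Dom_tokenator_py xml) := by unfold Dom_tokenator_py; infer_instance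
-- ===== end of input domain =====

-- B replaces A's char-by-char buffer state machine by an up-front CR/LF strip (str.replace)
-- followed by delimiter splits on '>' and '<' (idiomatic; same O(n), measured faster in CPython since replace/split run in C).

-- ===== PORT A =====
-- A's generator loop: `collected` is the buffer, each yield emits ''.join(collected).
def tokAgo (col : List Char) : List Char → List String
  | [] => []
  | ch :: rest =>
    if ch = '<' then
      (if col ≠ [] then [String.mk col] else []) ++ tokAgo ['<'] rest
    else if ch = '\r' ∨ ch = '\n' then
      tokAgo col rest
    else if ch = '>' then
      String.mk (col ++ ['>']) :: tokAgo [] rest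
    else
      tokAgo (col ++ [ch]) rest

def tokenator_py (xml : String) : List String := tokAgo [] xml.toList

-- ===== PORT B =====
-- yields of one non-final '>'-chunk (Source B's loop body over chunks[:-1])
def emitChunk (c : List Char) : List String :=
  match PySem.Chars.splitOn c ['<'] with
  | [] => []
  | [p] => [String.mk (p ++ ['>'])]
  | p :: rest =>
      (if p ≠ [] then [String.mk p] else []) ++
      rest.dropLast.map (fun q => String.mk ('<' :: q)) ++
      [String.mk ('<' :: rest.getLastD [] ++ ['>'])]

-- yields of the final chunk (after the last '>'); its trailing piece is dropped
def emitLast (c : List Char) : List String :=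
  match PySem.Chars.splitOn c ['<'] with
  | [] => []
  | p :: rest =>
      (if rest ≠ [] ∧ p ≠ [] then [String.mk p] else []) ++
      rest.dropLast.map (fun q => String.mk ('<' :: q))

def tokenator_py_alt (xml : String) : List String :=
  let s := PySem.Str.replace (PySem.Str.replace xml "\r" "") "\n" ""
  let chunks := PySem.Chars.splitOn s.toList ['>']
  chunks.dropLast.flatMap emitChunk ++ emitLast (chunks.getLastD [])

-- ===== PRECONDITION & SPEC =====
def Spec_tokenator_py (xml : String) (out : List String) : Prop := out = tokenator_py_alt xml
instance (xml : String) (out : List String) : Decidable (Spec_tokenator_py xml out) := by unfold Spec_tokenator_py; infer_instance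

-- ===== CLAIM (what is proved, stated in full; the proofs are below) =====
def Claim_equal_tokenator_py : Prop := ∀ (xml : String), Dom_tokenator_py xml → Spec_tokenator_py xml (tokenator_py xml)

-- ===== LEMMAS AND PROOFS =====
def splitC (d : Char) : List Char → List (List Char)
  | [] => [[]]
  | c :: cs =>
    if c = d then [] :: splitC d cs
    else
      match splitC d cs with
      | [] => [[c]]
      | p :: ps => (c :: p) :: ps

def consHead (x : List Char) : List (List Char) → List (List Char)
  | [] => [x]
  | p :: ps => (x ++ p) :: ps

lemma splitC_ne_nil (d : Char) (cs : List Char) : splitC d cs ≠ [] := by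
  cases cs with
  | nil => simp [splitC]
  | cons c cs' =>
    simp only [splitC]
    split
    · simp
    · split <;> simp

lemma consHead_nil_of_ne (x : List (List Char)) (h : x ≠ []) : consHead [] x = x := by
  cases x with
  | nil => exact absurd rfl h
  | cons p ps => simp [consHead]

lemma consHead_consHead (x y : List Char) (l : List (List Char)) :
    consHead x (consHead y l) = consHead (x ++ y) l := by
  cases l <;> simp [consHead]

lemma splitC_eq_consHead (d c : Char) (cs : List Char) (h : c ≠ d) :
    splitC d (c :: cs) = consHead [c] (splitC d cs) := by
  simp only [splitC, if_neg h]
  cases h2 : splitC d cs <;> simp [consHead]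

lemma splitOn_go_eq' (d : Char) :
    ∀ (fuel : Nat) (l cur : List Char) (acc : List (List Char)), l.length ≤ fuel →
    PySem.Chars.splitOn.go [d] fuel l cur acc
      = acc.reverse ++ consHead cur.reverse (splitC d l) := by
  intro fuel
  induction fuel with
  | zero =>
    intro l cur acc hl
    have : l = [] := List.length_eq_zero_iff.mp (Nat.le_zero.mp hl)
    subst this
    simp [PySem.Chars.splitOn.go, splitC, consHead]
  | succ f ih =>
    intro l cur acc hl
    cases l with
    | nil => simp [PySem.Chars.splitOn.go, splitC, consHead]
    | cons c rest =>
      simp only [PySem.Chars.splitOn.go]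
      by_cases hc : c = d
      · subst hc
        rw [if_pos (by simp)]
        rw [ih _ _ _ (by simpa using Nat.lt_succ_iff.mp (by simpa using hl))]
        have h2 := splitC_ne_nil c rest
        cases h3 : splitC c rest with
        | nil => exact absurd h3 h2
        | cons p ps => simp [splitC, consHead, h3]
      · rw [if_neg (by simp [List.isPrefixOf]; exact fun hh => hc hh.symm)]
        rw [ih _ _ _ (by simpa using Nat.lt_succ_iff.mp (by simpa using hl))]
        rw [splitC_eq_consHead d c rest hc]
        rw [consHead_consHead]
        simp

lemma splitOn_eq_splitC (d : Char) (cs : List Char) :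
    PySem.Chars.splitOn cs [d] = splitC d cs := by
  unfold PySem.Chars.splitOn
  rw [splitOn_go_eq' d _ _ _ _ (by omega)]
  simp [consHead_nil_of_ne _ (splitC_ne_nil _ _)]

lemma replace_go_eq (c : Char) :
    ∀ (fuel : Nat) (l acc : List Char), l.length ≤ fuel →
    PySem.Chars.replace.go [c] [] fuel l acc = acc.reverse ++ l.filter (· ≠ c) := by
  intro fuel
  induction fuel with
  | zero =>
    intro l acc hl
    have : l = [] := List.length_eq_zero_iff.mp (Nat.le_zero.mp hl)
    subst this
    simp [PySem.Chars.replace.go]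
  | succ f ih =>
    intro l acc hl
    cases l with
    | nil => simp [PySem.Chars.replace.go]
    | cons a rest =>
      simp only [PySem.Chars.replace.go]
      by_cases ha : a = c
      · subst ha
        rw [if_pos (by simp)]
        rw [ih _ _ (by simpa using Nat.lt_succ_iff.mp (by simpa using hl))]
        simp
      · rw [if_neg (by simp [List.isPrefixOf]; exact fun hh => ha hh.symm)]
        rw [ih _ _ (by simpa using Nat.lt_succ_iff.mp (by simpa using hl))]
        simp [ha]

lemma replace_eq_filter (c : Char) (cs : List Char) :
    PySem.Chars.replace cs [c] [] = cs.filter (· ≠ c) := by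
  unfold PySem.Chars.replace
  rw [if_neg (by simp)]
  rw [replace_go_eq c _ _ _ (by omega)]
  simp

def gA (col : List Char) : List Char → List (List Char)
  | [] => []
  | ch :: rest =>
    if ch = '<' then
      (if col ≠ [] then [col] else []) ++ gA ['<'] rest
    else if ch = '\r' ∨ ch = '\n' then
      gA col rest
    else if ch = '>' then
      (col ++ ['>']) :: gA [] rest
    else
      gA (col ++ [ch]) rest

def plain (c : Char) : Prop := c ≠ '<' ∧ c ≠ '>' ∧ c ≠ '\r' ∧ c ≠ '\n'

lemma gA_absorb (t : List Char) (ht : ∀ c ∈ t, plain c) :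
    ∀ (col cs : List Char), gA col (t ++ cs) = gA (col ++ t) cs := by
  induction t with
  | nil => simp
  | cons c t' ih =>
    intro col cs
    obtain ⟨h1, h2, h3, h4⟩ := ht c (by simp)
    have : gA col ((c :: t') ++ cs) = gA (col ++ [c]) (t' ++ cs) := by
      simp [gA, h1, h2, h3, h4]
    rw [this, ih (fun d hd => ht d (by simp [hd]))]
    simp

lemma gA_filter (cs : List Char) : ∀ col,
    gA col cs = gA col (cs.filter fun c => c ≠ '\r' ∧ c ≠ '\n') := by
  induction cs with
  | nil => simp [gA]
  | cons c cs' ih =>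
    intro col
    by_cases hnl : c = '\r' ∨ c = '\n'
    · have hlt : c ≠ '<' := by rcases hnl with h | h <;> subst h <;> decide
      have hfilter : ¬ (c ≠ '\r' ∧ c ≠ '\n') := by tauto
      simp only [List.filter_cons, decide_eq_true_eq, hfilter, if_false]
      simp [gA, hlt, hnl, ih]
    · have hfilter : (c ≠ '\r' ∧ c ≠ '\n') := by tauto
      simp only [List.filter_cons, decide_eq_true_eq, hfilter, if_true]
      by_cases h1 : c = '<'
      · simp [gA, h1, ih]
      · by_cases h3 : c = '>'
        · simp [gA, h1, h3, hnl, ih, hfilter.1, hfilter.2]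
        · simp [gA, h1, h3, hnl, ih, hfilter.1, hfilter.2]

lemma first_split {d : Char} {l : List Char} (h : d ∈ l) :
    ∃ a b, l = a ++ d :: b ∧ d ∉ a := by
  induction l with
  | nil => simp at h
  | cons c l' ih =>
    by_cases hc : c = d
    · exact ⟨[], l', by simp [hc], by simp⟩
    · have : d ∈ l' := by
        rcases List.mem_cons.mp h with h' | h'
        · exact absurd h'.symm hc
        · exact h'
      obtain ⟨a, b, hab, hna⟩ := ih this
      exact ⟨c :: a, b, by simp [hab], by simp [hna]; exact fun hh => hc hh.symm⟩

lemma gA_lt (r : List Char) : ∀ t : List Char, (∀ c ∈ t, plain c) →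
    (∀ c ∈ r, c ≠ '>' ∧ c ≠ '\r' ∧ c ≠ '\n') →
    gA ('<' :: t) r = (consHead t (splitC '<' r)).dropLast.map (fun q => '<' :: q) := by
  induction r with
  | nil => intro t ht hr; simp [gA, splitC, consHead]
  | cons c r' ih =>
    intro t ht hr
    obtain ⟨h3, h4, h5⟩ := hr c (by simp)
    by_cases h1 : c = '<'
    · subst h1
      have : gA ('<' :: t) ('<' :: r') = ('<' :: t) :: gA ['<'] r' := by simp [gA]
      rw [this, ih [] (by simp) (fun d hd => hr d (by simp [hd]))]
      have hsp : splitC '<' ('<' :: r') = [] :: splitC '<' r' := by simp [splitC]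
      rw [hsp]
      cases h3 : splitC '<' r' with
      | nil => exact absurd h3 (splitC_ne_nil _ _)
      | cons p ps => simp [consHead, h3]
    · have hplain : plain c := ⟨h1, h3, h4, h5⟩
      have : gA ('<' :: t) (c :: r') = gA ('<' :: (t ++ [c])) r' := by
        simp [gA, h1, h3, h4, h5]
      rw [this, ih (t ++ [c]) (by intro d hd; rcases List.mem_append.mp hd with h | h
                                  exacts [ht d h, by have := List.mem_singleton.mp h; subst this; exact hplain])
            (fun d hd => hr d (by simp [hd]))]
      rw [splitC_eq_consHead _ _ _ h1, consHead_consHead]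

lemma gA_mid (q : List Char) : ∀ (t b : List Char), (∀ c ∈ t, plain c) →
    (∀ c ∈ q, c ≠ '>' ∧ c ≠ '\r' ∧ c ≠ '\n') →
    gA ('<' :: t) (q ++ '>' :: b)
      = (consHead t (splitC '<' q)).dropLast.map (fun p => '<' :: p)
        ++ ['<' :: (consHead t (splitC '<' q)).getLastD [] ++ ['>']]
        ++ gA [] b := by
  induction q with
  | nil =>
    intro t b ht hq
    simp [gA, splitC, consHead]
  | cons c q' ih =>
    intro t b ht hq
    obtain ⟨h3, h4, h5⟩ := hq c (by simp)
    by_cases h1 : c = '<'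
    · subst h1
      have : gA ('<' :: t) (('<' :: q') ++ '>' :: b) = ('<' :: t) :: gA ['<'] (q' ++ '>' :: b) := by
        simp [gA]
      rw [this, ih [] b (by simp) (fun d hd => hq d (by simp [hd]))]
      have hsp : splitC '<' ('<' :: q') = [] :: splitC '<' q' := by simp [splitC]
      rw [hsp]
      cases h3 : splitC '<' q' with
      | nil => exact absurd h3 (splitC_ne_nil _ _)
      | cons p ps => simp [consHead, h3]
    · have hplain : plain c := ⟨h1, h3, h4, h5⟩
      have : gA ('<' :: t) ((c :: q') ++ '>' :: b) = gA ('<' :: (t ++ [c])) (q' ++ '>' :: b) := by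
        simp [gA, h1, h3, h4, h5]
      rw [this, ih (t ++ [c]) b (by intro d hd; rcases List.mem_append.mp hd with h | h
                                    exacts [ht d h, by have := List.mem_singleton.mp h; subst this; exact hplain])
            (fun d hd => hq d (by simp [hd]))]
      rw [splitC_eq_consHead _ _ _ h1, consHead_consHead]

lemma splitC_of_not_mem {d : Char} {cs : List Char} (h : d ∉ cs) : splitC d cs = [cs] := by
  induction cs with
  | nil => simp [splitC]
  | cons c cs' ih =>
    have hc : c ≠ d := fun hh => h (by simp [hh])
    rw [splitC_eq_consHead _ _ _ hc, ih (fun hh => h (by simp [hh]))]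
    simp [consHead]

lemma splitC_first {d : Char} {a b : List Char} (h : d ∉ a) :
    splitC d (a ++ d :: b) = a :: splitC d b := by
  induction a with
  | nil => simp [splitC]
  | cons c a' ih =>
    have hc : c ≠ d := fun hh => h (by simp [hh])
    rw [List.cons_append, splitC_eq_consHead _ _ _ hc, ih (fun hh => h (by simp [hh]))]
    simp [consHead]

def eMidC (c : List Char) : List (List Char) :=
  match splitC '<' c with
  | [] => []
  | [p] => [p ++ ['>']]
  | p :: rest =>
      (if p ≠ [] then [p] else []) ++ rest.dropLast.map (fun q => '<' :: q)
        ++ ['<' :: rest.getLastD [] ++ ['>']]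

def eLastC (c : List Char) : List (List Char) :=
  match splitC '<' c with
  | [] => []
  | p :: rest =>
      (if rest ≠ [] ∧ p ≠ [] then [p] else []) ++ rest.dropLast.map (fun q => '<' :: q)

def charB (cs : List Char) : List (List Char) :=
  let chunks := splitC '>' cs
  chunks.dropLast.flatMap eMidC ++ eLastC (chunks.getLastD [])

lemma gA_midTop (a b : List Char) (ha : ∀ c ∈ a, c ≠ '>' ∧ c ≠ '\r' ∧ c ≠ '\n') :
    gA [] (a ++ '>' :: b) = eMidC a ++ gA [] b := by
  by_cases hlt : '<' ∈ a
  · obtain ⟨p, q, hpq, hnp⟩ := first_split hlt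
    subst hpq
    have hp : ∀ c ∈ p, plain c := by
      intro c hc
      obtain ⟨x, y, z⟩ := ha c (by simp [hc])
      exact ⟨fun hh => hnp (hh ▸ hc), x, y, z⟩
    have step1 : gA [] ((p ++ '<' :: q) ++ '>' :: b) = gA p ('<' :: (q ++ '>' :: b)) := by
      rw [show (p ++ '<' :: q) ++ '>' :: b = p ++ ('<' :: (q ++ '>' :: b)) by simp]
      rw [gA_absorb p hp]
      simp
    rw [step1]
    have step2 : gA p ('<' :: (q ++ '>' :: b))
        = (if p ≠ [] then [p] else []) ++ gA ['<'] (q ++ '>' :: b) := by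
      simp [gA]
    rw [step2, gA_mid q [] b (by simp) (fun d hd => ha d (by simp [hd]))]
    rw [consHead_nil_of_ne _ (splitC_ne_nil _ _)]
    unfold eMidC
    rw [splitC_first hnp]
    have hne := splitC_ne_nil '<' q
    cases h2 : splitC '<' q with
    | nil => exact absurd h2 hne
    | cons r rs => simp
  · have hp : ∀ c ∈ a, plain c := by
      intro c hc
      obtain ⟨x, y, z⟩ := ha c hc
      exact ⟨fun hh => hlt (hh ▸ hc), x, y, z⟩
    rw [show a ++ '>' :: b = a ++ ('>' :: b) by simp, gA_absorb a hp]
    have : gA ([] ++ a) ('>' :: b) = (a ++ ['>']) :: gA [] b := by simp [gA]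
    rw [this]
    unfold eMidC
    rw [splitC_of_not_mem hlt]
    simp

lemma gA_lastTop (cs : List Char) (h : ∀ c ∈ cs, c ≠ '>' ∧ c ≠ '\r' ∧ c ≠ '\n') :
    gA [] cs = eLastC cs := by
  by_cases hlt : '<' ∈ cs
  · obtain ⟨p, q, hpq, hnp⟩ := first_split hlt
    subst hpq
    have hp : ∀ c ∈ p, plain c := by
      intro c hc
      obtain ⟨x, y, z⟩ := h c (by simp [hc])
      exact ⟨fun hh => hnp (hh ▸ hc), x, y, z⟩
    rw [gA_absorb p hp]
    have step2 : gA ([] ++ p) ('<' :: q)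
        = (if p ≠ [] then [p] else []) ++ gA ['<'] q := by
      simp [gA]
    rw [step2, gA_lt q [] (by simp) (fun d hd => h d (by simp [hd]))]
    rw [consHead_nil_of_ne _ (splitC_ne_nil _ _)]
    unfold eLastC
    rw [splitC_first hnp]
    simp [splitC_ne_nil]
  · have hp : ∀ c ∈ cs, plain c := by
      intro c hc
      obtain ⟨x, y, z⟩ := h c hc
      exact ⟨fun hh => hlt (hh ▸ hc), x, y, z⟩
    rw [show cs = cs ++ [] by simp, gA_absorb cs hp]
    have : gA ([] ++ cs) [] = [] := by simp [gA]
    rw [this]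
    unfold eLastC
    rw [splitC_of_not_mem (by simpa using hlt)]
    simp

lemma gA_eq_charB (cs : List Char) (h : ∀ c ∈ cs, c ≠ '\r' ∧ c ≠ '\n') :
    gA [] cs = charB cs := by
  have main : ∀ n (cs : List Char), cs.length ≤ n → (∀ c ∈ cs, c ≠ '\r' ∧ c ≠ '\n') →
      gA [] cs = charB cs := by
    intro n
    induction n with
    | zero =>
      intro cs hl hcs
      have : cs = [] := List.length_eq_zero_iff.mp (Nat.le_zero.mp hl)
      subst this
      simp [gA, charB, splitC, eLastC, consHead]
    | succ m ih =>
      intro cs hl hcs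
      by_cases hgt : '>' ∈ cs
      · obtain ⟨a, b, hab, hna⟩ := first_split hgt
        subst hab
        have ha : ∀ c ∈ a, c ≠ '>' ∧ c ≠ '\r' ∧ c ≠ '\n' := by
          intro c hc
          obtain ⟨x, y⟩ := hcs c (by simp [hc])
          exact ⟨fun hh => hna (hh ▸ hc), x, y⟩
        rw [gA_midTop a b ha]
        rw [ih b (by simp at hl; omega) (fun d hd => hcs d (by simp [hd]))]
        unfold charB
        rw [splitC_first hna]
        have hne := splitC_ne_nil '>' b
        cases h2 : splitC '>' b with
        | nil => exact absurd h2 hne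
        | cons r rs => simp
      · rw [gA_lastTop cs (fun c hc => ⟨fun hh => hgt (hh ▸ hc), (hcs c hc).1, (hcs c hc).2⟩)]
        unfold charB
        rw [splitC_of_not_mem hgt]
        simp
  exact main cs.length cs le_rfl h

lemma tokAgo_eq_map (cs : List Char) : ∀ col, tokAgo col cs = (gA col cs).map String.mk := by
  induction cs with
  | nil => intro col; simp [tokAgo, gA]
  | cons c cs' ih =>
    intro col
    by_cases h1 : c = '<'
    · by_cases hcol : col = []
      · simp [tokAgo, gA, h1, hcol, ih]
      · simp [tokAgo, gA, h1, hcol, ih]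
    · by_cases h2 : c = '\r' ∨ c = '\n'
      · simp [tokAgo, gA, h1, h2, ih]
      · by_cases h3 : c = '>'
        · simp [tokAgo, gA, h1, h2, h3, ih]
        · simp [tokAgo, gA, h1, h2, h3, ih]

lemma emitChunk_eq (c : List Char) : emitChunk c = (eMidC c).map String.mk := by
  unfold emitChunk eMidC
  rw [splitOn_eq_splitC]
  cases h : splitC '<' c with
  | nil => simp
  | cons p rest =>
    cases rest with
    | nil => simp
    | cons r rs =>
      by_cases hp : p = []
      · (simp [hp]; rfl)
      · (simp [hp]; rfl)

lemma emitLast_eq (c : List Char) : emitLast c = (eLastC c).map String.mk := by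
  unfold emitLast eLastC
  rw [splitOn_eq_splitC]
  cases h : splitC '<' c with
  | nil => simp
  | cons p rest =>
    by_cases hc : rest ≠ [] ∧ p ≠ []
    · (simp [hc]; rfl)
    · (simp [hc]; rfl)

lemma alt_eq_charB (xml : String) :
    tokenator_py_alt xml
      = (charB (xml.toList.filter fun c => c ≠ '\r' ∧ c ≠ '\n')).map String.mk := by
  unfold tokenator_py_alt
  have hs : (PySem.Str.replace (PySem.Str.replace xml "\r" "") "\n" "").toList
      = xml.toList.filter fun c => decide (c ≠ '\r' ∧ c ≠ '\n') := by
    rw [PySem.Str.toList_replace, PySem.Str.toList_replace]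
    show PySem.Chars.replace (PySem.Chars.replace xml.toList ['\r'] []) ['\n'] [] = _
    rw [replace_eq_filter, replace_eq_filter, List.filter_filter]
    apply List.filter_congr
    intro c _
    simp [and_comm]
  simp only [hs]
  unfold charB
  rw [splitOn_eq_splitC]
  have hfm : ∀ l : List (List Char), l.flatMap emitChunk = (l.flatMap eMidC).map String.mk := by
    intro l
    induction l with
    | nil => simp
    | cons x xs ih => simp [emitChunk_eq, ih]
  rw [List.map_append, hfm, emitLast_eq]

-- ===== VERDICT (by name: the statement is the Claim_ definition above) =====
theorem tokenator_py_spec : Claim_equal_tokenator_py := by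
  intro xml _
  show tokAgo [] xml.toList = tokenator_py_alt xml
  have h : ∀ c ∈ (xml.toList.filter fun c => c ≠ '\r' ∧ c ≠ '\n'), c ≠ '\r' ∧ c ≠ '\n' := by
    intro c hc
    simpa using (List.mem_filter.mp hc).2
  rw [alt_eq_charB, tokAgo_eq_map, gA_filter, gA_eq_charB _ h]
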